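-- pv_equiv track=rewrite | github.com/Neptune-Trojans/road_traffic_analysis | plate_reader.py | _post_process_multiple_plate_readings
-- ===== SOURCE A (Python) =====
-- from collections import Counter
--
-- def _post_process_multiple_plate_readings(plate_readings: list[str]) -> str:
--     # Filter results to keep only strings of the same length as the most common length
--     most_common_length = max(map(len, plate_readings), key=lambda x: sum(len(r) == x for r in plate_readings))
--     filtered_results = [r for r in plate_readings if len(r) == most_common_length]
--
--     # Majority voting for each character position
--     final_result = ''.join(
--         Counter(chars).most_common(1)[0][0]
--         for chars in zip(*filtered_results)
--     )
--     return final_result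
-- ===== SOURCE B (Python) =====
-- def _mode(items):
--     # Recursive elimination over distinct values: the first value competes
--     # against the mode of the list with every occurrence of it removed.
--     v = items[0]
--     rest = [x for x in items if x != v]
--     if not rest:
--         return v
--     w = _mode(rest)
--     return w if rest.count(w) > items.count(v) else v
--
--
-- def _post_process_multiple_plate_readings(plate_readings: list[str]) -> str:
--     length = _mode([len(r) for r in plate_readings])
--     survivors = [r for r in plate_readings if len(r) == length]
--     return ''.join(_mode([r[i] for r in survivors]) for i in range(length))
-- ===== Notes on version B (the rewrite author's own statement) =====
-- stated objective: alternative
-- what changed: Replaces Counter-based plurality voting (and the zip-transpose) by one generic recursive-elimination mode: the first value's count competes against the mode of the list with that value filtered out, applied to the length list and to each character column.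
import Mathlib
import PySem

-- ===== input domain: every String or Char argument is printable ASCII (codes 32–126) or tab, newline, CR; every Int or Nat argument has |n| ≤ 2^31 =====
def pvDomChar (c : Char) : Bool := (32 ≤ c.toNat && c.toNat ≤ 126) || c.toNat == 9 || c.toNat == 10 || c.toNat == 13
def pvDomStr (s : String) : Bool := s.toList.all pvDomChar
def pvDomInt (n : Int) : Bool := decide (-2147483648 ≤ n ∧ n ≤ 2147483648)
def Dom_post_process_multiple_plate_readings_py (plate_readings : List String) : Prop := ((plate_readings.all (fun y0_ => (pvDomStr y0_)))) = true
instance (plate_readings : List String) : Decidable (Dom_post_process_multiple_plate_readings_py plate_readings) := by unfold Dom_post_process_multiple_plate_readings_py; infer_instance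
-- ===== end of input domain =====

-- B replaces A's Counter-based plurality votes (and the zip-transpose) by one generic
-- recursive-elimination mode helper; a timing run measured B faster (A's length vote
-- recounts matching lengths for every reading).

-- ===== PORT A =====
-- Counter(cs).most_common(1)[0][0]: first key of maximal count (most_common orders by count
-- descending, stable on insertion order). The ' ' default is unreachable: A applies it only
-- to nonempty counters.
def pvMostCommon1 (c : PySem.Dict Char Int) : Char :=
  ((PySem.List.max? c.items (fun p => p.2)).map Prod.fst).getD ' '

-- zip(*ls): position-wise tuples up to the shortest list; the ' ' default is unreachable
-- (the index is always below every list's length).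
def pvZipN (ls : List (List Char)) : List (List Char) :=
  match ls with
  | [] => []
  | l0 :: rest =>
      (List.range ((rest.map List.length).foldl min l0.length)).map
        (fun i => (l0 :: rest).map (fun l => l.getD i ' '))

def post_process_multiple_plate_readings_py (plate_readings : List String) : String :=
  match PySem.List.max? (plate_readings.map PySem.Str.len)
      (fun x => ((plate_readings.countP (fun r => PySem.Str.len r == x) : Nat) : Int)) with
  | none => ""   -- unreachable under Pre_: Python's max raises ValueError on an empty list
  | some most_common_length =>
    let filtered_results := plate_readings.filter (fun r => PySem.Str.len r == most_common_length)
    String.ofList ((pvZipN (filtered_results.map String.toList)).map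
      (fun chars => pvMostCommon1 (PySem.Dict.counter chars)))

-- ===== PORT B =====
-- _mode(items): recursive elimination over distinct values. [] ↦ none is Python's
-- IndexError on items[0] (unreachable under Pre_, as is the inner `none` branch:
-- rest is nonempty there).
def pvMode {α : Type} [BEq α] [LawfulBEq α] : List α → Option α
  | [] => none
  | v :: t =>
    let rest := (v :: t).filter (fun x => !(x == v))
    if rest.isEmpty then some v
    else
      match pvMode rest with
      | none => some v
      | some w => if (v :: t).count v < rest.count w then some w else some v
  termination_by l => l.length
  decreasing_by
    have : ((v :: t).filter (fun x => !(x == v))).length ≤ t.length := by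
      simp only [List.filter_cons, beq_self_eq_true, Bool.not_true, if_false, Bool.false_eq_true]
      exact List.length_filter_le _ _
    simp only [List.length_cons]; omega

-- r[i] is always in range (survivors all have length `length`, 0 ≤ i < length), and
-- _mode is applied to nonempty column lists, so both ' ' defaults are unreachable.
def post_process_multiple_plate_readings_py_alt (plate_readings : List String) : String :=
  match pvMode (plate_readings.map PySem.Str.len) with
  | none => ""   -- unreachable under Pre_: _mode raises IndexError on the empty list
  | some length =>
    let survivors := plate_readings.filter (fun r => PySem.Str.len r == length)
    String.ofList ((PySem.List.pyRange 0 length 1).map (fun i =>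
      (pvMode (survivors.map (fun r => PySem.List.pyGetD r.toList i ' '))).getD ' '))

-- ===== PRECONDITION & SPEC =====
-- Pre_ excludes only the empty list, on which A raises ValueError (max of an empty
-- sequence); B's Python raises IndexError there too.
def Pre_post_process_multiple_plate_readings_py (plate_readings : List String) : Prop :=
  plate_readings ≠ []
instance (plate_readings : List String) : Decidable (Pre_post_process_multiple_plate_readings_py plate_readings) := by unfold Pre_post_process_multiple_plate_readings_py; infer_instance

def pvWitness_post_process_multiple_plate_readings_py : List String :=
  ["AB12", "AB17", "XB12", "Q1"]

def Spec_post_process_multiple_plate_readings_py (plate_readings : List String) (out : String) : Prop := out = post_process_multiple_plate_readings_py_alt plate_readings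
instance (plate_readings : List String) (out : String) : Decidable (Spec_post_process_multiple_plate_readings_py plate_readings out) := by unfold Spec_post_process_multiple_plate_readings_py; infer_instance

-- ===== CLAIM (what is proved, stated in full; the proofs are below) =====
def Claim_equal_post_process_multiple_plate_readings_py : Prop := ∀ (plate_readings : List String), Dom_post_process_multiple_plate_readings_py plate_readings → Pre_post_process_multiple_plate_readings_py plate_readings → Spec_post_process_multiple_plate_readings_py plate_readings (post_process_multiple_plate_readings_py plate_readings)

-- ===== LEMMAS AND PROOFS =====

-- max over a mapped list commutes with the map (the first maximum is preserved).
theorem pv_max?_map {α β : Type} (h : α → β) (k : β → Int) (ys : List α) :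
    PySem.List.max? (ys.map h) k = (PySem.List.max? ys (fun y => k (h y))).map h := by
  simp only [PySem.List.max?, List.foldl_map]
  suffices H : ∀ (acc : Option α),
      List.foldl (fun a y => match a with
        | none => some (h y)
        | some m => if k m < k (h y) then some (h y) else some m) (acc.map h) ys
      = (List.foldl (fun a y => match a with
        | none => some y
        | some m => if k (h m) < k (h y) then some y else some m) acc ys).map h by
    simpa using H none
  intro acc
  induction ys generalizing acc with
  | nil => rfl
  | cons y t ih =>
    cases acc with
    | none => simpa using ih (some y)
    | some m =>
      by_cases hc : k (h m) < k (h y) <;> simp [hc] <;> [exact ih (some y); exact ih (some m)]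

-- folding Python's max one step further on an appended element
theorem pv_max?_step {α : Type} (k : α → Int) (l : List α) (x : α) :
    PySem.List.max? (l ++ [x]) k = match PySem.List.max? l k with
      | none => some x
      | some m => if k m < k x then some x else some m := by
  simp [PySem.List.max?, List.foldl_append]
  rfl

-- duplicates never change Python's max (the first element of maximal key).
theorem pv_max?_dedup {α : Type} [BEq α] [LawfulBEq α] (xs : List α) (k : α → Int) :
    PySem.List.max? xs k = PySem.List.max? (PySem.List.dedup xs) k := by
  induction xs using List.reverseRecOn with
  | nil => rfl
  | append_singleton t x ih =>
    have hd : PySem.List.dedup (t ++ [x]) = PySem.Set.add (PySem.List.dedup t) x := by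
      simp only [PySem.List.dedup_eq_ofList, PySem.Set.ofList_eq_foldl, List.foldl_append,
        List.foldl_cons, List.foldl_nil]
    by_cases hx : x ∈ t
    · have hadd : PySem.Set.add (PySem.List.dedup t) x = PySem.List.dedup t := by
        simp [PySem.Set.add, PySem.Set.contains, hx]
      rw [hd, hadd, ← ih, pv_max?_step]
      obtain ⟨m, hm⟩ : ∃ m, PySem.List.max? t k = some m := by
        cases hEq : PySem.List.max? t k with
        | none => exact absurd (List.ne_nil_of_mem hx) (by simpa using (PySem.List.max?_eq_none_iff t k).mp hEq)
        | some m => exact ⟨m, rfl⟩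
      rw [hm]
      simp [not_lt.mpr (PySem.List.max?_isMax hm x hx)]
    · have hadd : PySem.Set.add (PySem.List.dedup t) x = PySem.List.dedup t ++ [x] := by
        simp [PySem.Set.add, PySem.Set.contains, hx]
      rw [hd, hadd, pv_max?_step, pv_max?_step, ih]

theorem pv_max?_fromSome {α : Type} (k : α → Int) (S : List α) (v : α) :
    List.foldl (fun a y => match a with
        | none => some y
        | some m => if k m < k y then some y else some m) (some v) S
    = match PySem.List.max? S k with
      | none => some v
      | some m => if k v < k m then some m else some v := by
  induction S generalizing v with
  | nil => rfl
  | cons x S' ih =>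
    have hx : PySem.List.max? (x :: S') k
        = List.foldl (fun a y => match a with
            | none => some y
            | some m => if k m < k y then some y else some m) (some x) S' := rfl
    rw [hx, ih x]
    simp only [List.foldl_cons]
    cases hS : PySem.List.max? S' k with
    | none =>
      by_cases hvx : k v < k x
      · rw [if_pos hvx, ih x, hS]; dsimp only; rw [if_pos hvx]
      · rw [if_neg hvx, ih v, hS]; dsimp only; rw [if_neg hvx]
    | some m =>
      by_cases hvx : k v < k x
      · rw [if_pos hvx, ih x, hS]; dsimp only
        by_cases hxm : k x < k m
        · rw [if_pos hxm]; dsimp only; rw [if_pos (lt_trans hvx hxm)]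
        · rw [if_neg hxm]; dsimp only; rw [if_pos hvx]
      · rw [if_neg hvx, ih v, hS]; dsimp only
        by_cases hxm : k x < k m
        · rw [if_pos hxm]
        · rw [if_neg hxm]; dsimp only
          rw [if_neg (by omega : ¬ k v < k m), if_neg hvx]

theorem pv_max?_cons {α : Type} (k : α → Int) (v : α) (S : List α) :
    PySem.List.max? (v :: S) k = match PySem.List.max? S k with
      | none => some v
      | some m => if k v < k m then some m else some v := by
  have hx : PySem.List.max? (v :: S) k
      = List.foldl (fun a y => match a with
          | none => some y
          | some m => if k m < k y then some y else some m) (some v) S := rfl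
  rw [hx, pv_max?_fromSome]

theorem pv_max?_congr {α : Type} (xs : List α) (k1 k2 : α → Int)
    (h : ∀ x ∈ xs, k1 x = k2 x) : PySem.List.max? xs k1 = PySem.List.max? xs k2 := by
  simp only [PySem.List.max?]
  suffices H : ∀ (acc : Option α), (∀ m, acc = some m → k1 m = k2 m) →
      List.foldl (fun a y => match a with
        | none => some y
        | some m => if k1 m < k1 y then some y else some m) acc xs
      = List.foldl (fun a y => match a with
        | none => some y
        | some m => if k2 m < k2 y then some y else some m) acc xs from
    H none (by simp)
  induction xs with
  | nil => intro acc _; rfl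
  | cons x t ih =>
    intro acc hacc
    have hx : k1 x = k2 x := h x (by simp)
    have ht : ∀ y ∈ t, k1 y = k2 y := fun y hy => h y (by simp [hy])
    cases acc with
    | none =>
      simp only [List.foldl_cons]
      exact ih ht (some x) (by rintro m hm; cases hm; exact hx)
    | some m =>
      have hm : k1 m = k2 m := hacc m rfl
      simp only [List.foldl_cons, hm, hx]
      exact ih ht _ (by
        rintro m' hm'
        split at hm' <;> cases hm'
        · exact hx
        · exact hm)

-- helper: adding elements already suppressed by v: filtering v's out changes nothing once v is in the set
theorem pv_foldl_add_filter {α : Type} [BEq α] [LawfulBEq α] (v : α) (t : List α) :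
    ∀ (acc : List α), v ∈ acc →
      List.foldl PySem.Set.add acc t
        = List.foldl PySem.Set.add acc (t.filter (fun x => !(x == v))) := by
  induction t with
  | nil => intro acc _; rfl
  | cons x t ih =>
    intro acc hacc
    by_cases hxv : x = v
    · subst hxv
      have : PySem.Set.add acc x = acc := by simp [PySem.Set.add, PySem.Set.contains, hacc]
      simp only [List.filter_cons, beq_self_eq_true, Bool.not_true, List.foldl_cons, this]
      exact ih acc hacc
    · have hmem : v ∈ PySem.Set.add acc x := by
        simp only [PySem.Set.add]; split <;> simp [hacc]
      simp only [List.filter_cons, List.foldl_cons]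
      rw [if_pos (by simp [hxv])]
      simp only [List.foldl_cons]
      exact ih _ hmem
  
theorem pv_foldl_add_fresh {α : Type} [BEq α] [LawfulBEq α] (v : α) :
    ∀ (l s : List α), v ∉ l →
      List.foldl PySem.Set.add (v :: s) l = v :: List.foldl PySem.Set.add s l := by
  intro l
  induction l with
  | nil => intro s _; rfl
  | cons x l ih =>
    intro s hv
    have hxv : ¬ (x = v) := fun h => hv (by simp [h])
    have hc : PySem.Set.add (v :: s) x = v :: PySem.Set.add s x := by
      by_cases hsx : x ∈ s <;>
        simp [PySem.Set.add, PySem.Set.contains, hsx, hxv]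
    simp only [List.foldl_cons, hc]
    exact ih _ (fun h => hv (by simp [h]))

theorem pv_dedup_cons {α : Type} [BEq α] [LawfulBEq α] (v : α) (t : List α) :
    PySem.List.dedup (v :: t) = v :: PySem.List.dedup (t.filter (fun x => !(x == v))) := by
  simp only [PySem.List.dedup_eq_ofList, PySem.Set.ofList_eq_foldl, List.foldl_cons]
  have h0 : PySem.Set.add ([] : List α) v = [v] := by
    simp [PySem.Set.add, PySem.Set.contains]
  rw [h0, pv_foldl_add_filter v t [v] (by simp)]
  exact pv_foldl_add_fresh v _ [] (by simp)

theorem pv_count_filter {α : Type} [BEq α] [LawfulBEq α] (l : List α) (v w : α) (h : w ≠ v) :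
    (l.filter (fun x => !(x == v))).count w = l.count w := by
  rw [List.count_filter]
  · simp [h]

theorem pv_mode_eq_max? {α : Type} [BEq α] [LawfulBEq α] (items : List α) :
    pvMode items = PySem.List.max? items (fun x => ((items.count x : Nat) : Int)) := by
  suffices H : ∀ (n : Nat) (items : List α), items.length ≤ n →
      pvMode items = PySem.List.max? items (fun x => ((items.count x : Nat) : Int)) from
    H items.length items le_rfl
  intro n
  induction n with
  | zero =>
    intro items h
    have : items = [] := List.eq_nil_of_length_eq_zero (Nat.le_zero.mp h)
    subst this; rw [pvMode]; rfl
  | succ n ihn =>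
    intro items h
    match items with
    | [] => rw [pvMode]; rfl
    | v :: t =>
      have hrestt : (v :: t).filter (fun x => !(x == v)) = t.filter (fun x => !(x == v)) := by
        simp
      have hlen : ((v :: t).filter (fun x => !(x == v))).length ≤ n := by
        rw [hrestt]
        have := List.length_filter_le (fun x => !(x == v)) t
        simp only [List.length_cons] at h
        omega
      have hkey : ∀ x ∈ (v :: t).filter (fun x => !(x == v)),
          ((((v :: t).filter (fun x => !(x == v))).count x : Nat) : Int)
            = (((v :: t).count x : Nat) : Int) := by
        intro x hx
        have hxv : x ≠ v := by
          have := List.of_mem_filter hx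
          simpa using this
        rw [pv_count_filter (v :: t) v x hxv]
      have hih : pvMode ((v :: t).filter (fun x => !(x == v)))
          = PySem.List.max? ((v :: t).filter (fun x => !(x == v)))
              (fun x => (((v :: t).count x : Nat) : Int)) := by
        rw [ihn _ hlen]
        exact pv_max?_congr _ _ _ hkey
      have hmax : PySem.List.max? (v :: t) (fun x => (((v :: t).count x : Nat) : Int))
          = match PySem.List.max? ((v :: t).filter (fun x => !(x == v)))
                (fun x => (((v :: t).count x : Nat) : Int)) with
            | none => some v
            | some m => if (((v :: t).count v : Nat) : Int) < (((v :: t).count m : Nat) : Int)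
                then some m else some v := by
        rw [pv_max?_dedup (v :: t), pv_dedup_cons, pv_max?_cons, ← hrestt,
          ← pv_max?_dedup]
      rw [pvMode, hmax]
      cases hR : PySem.List.max? ((v :: t).filter (fun x => !(x == v)))
          (fun x => (((v :: t).count x : Nat) : Int)) with
      | none =>
        have : (v :: t).filter (fun x => !(x == v)) = [] :=
          (PySem.List.max?_eq_none_iff _ _).mp hR
        rw [hih, hR]
        simp [this]
      | some m =>
        have hne : (v :: t).filter (fun x => !(x == v)) ≠ [] := by
          intro hc
          rw [hc] at hR
          simp [PySem.List.max?] at hR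
        have hmemf : m ∈ (v :: t).filter (fun x => !(x == v)) := PySem.List.max?_mem hR
        have hmv : m ≠ v := by
          have := List.of_mem_filter hmemf
          simpa using this
        rw [hih, hR]
        rw [if_neg (by simpa [List.isEmpty_iff] using hne)]
        dsimp only
        have hcnt : ((v :: t).filter (fun x => !(x == v))).count m = (v :: t).count m :=
          pv_count_filter (v :: t) v m hmv
        rw [hcnt]
        by_cases hlt : (v :: t).count v < (v :: t).count m
        · rw [if_pos hlt, if_pos (by exact_mod_cast hlt)]
        · rw [if_neg hlt, if_neg (by exact_mod_cast hlt)]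

-- Counter(chars).most_common(1)[0][0] (with ' ' for the empty counter) is the first
-- element of maximal count, i.e. the same mode both ports vote with.
theorem pv_counter_mode (chars : List Char) :
    pvMostCommon1 (PySem.Dict.counter chars)
      = (PySem.List.max? chars (fun x => ((chars.count x : Nat) : Int))).getD ' ' := by
  unfold pvMostCommon1
  rw [PySem.Dict.items_counter]
  rw [pv_max?_map (fun k => (k, (chars.count k : Int))) (fun p => p.2) (PySem.Set.ofList chars)]
  rw [pv_max?_dedup chars, PySem.List.dedup_eq_ofList]
  cases PySem.List.max? (PySem.Set.ofList chars) (fun x => ((chars.count x : Nat) : Int)) with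
  | none => rfl
  | some m => rfl

-- a fold of min over a constant list is that constant
theorem pv_foldl_min_const (l : List Nat) (n : Nat) (h : ∀ y ∈ l, y = n) :
    l.foldl min n = n := by
  induction l with
  | nil => rfl
  | cons y t ih =>
    have hy : y = n := h y (by simp)
    simp only [List.foldl_cons, hy, min_self]
    exact ih (fun z hz => h z (by simp [hz]))

-- the two ports agree (on the empty list both ports return "", though both Pythons raise)
theorem pv_main (xs : List String) :
    post_process_multiple_plate_readings_py xs = post_process_multiple_plate_readings_py_alt xs := by
  unfold post_process_multiple_plate_readings_py post_process_multiple_plate_readings_py_alt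
  have hscr : pvMode (xs.map PySem.Str.len)
      = PySem.List.max? (xs.map PySem.Str.len)
          (fun x => ((xs.countP (fun r => PySem.Str.len r == x) : Nat) : Int)) := by
    rw [pv_mode_eq_max?]
    apply pv_max?_congr
    intro x _
    congr 1
    rw [List.count_eq_countP, List.countP_map]
    rfl
  rw [hscr]
  cases hL : PySem.List.max? (xs.map PySem.Str.len)
      (fun x => ((xs.countP (fun r => PySem.Str.len r == x) : Nat) : Int)) with
  | none => rfl
  | some L =>
    dsimp only
    obtain ⟨r0, hr0x, hr0⟩ := List.mem_map.mp (PySem.List.max?_mem hL)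
    have hL0 : 0 ≤ L := by
      rw [← hr0, PySem.Str.len_eq]
      exact Int.natCast_nonneg _
    set F := xs.filter (fun r => PySem.Str.len r == L) with hF
    have hFlen : ∀ r ∈ F, r.toList.length = L.toNat := by
      intro r hr
      have h1 : PySem.Str.len r = L := by simpa using List.of_mem_filter hr
      rw [PySem.Str.len_eq] at h1
      omega
    have hFne : F ≠ [] :=
      List.ne_nil_of_mem (List.mem_filter.mpr ⟨hr0x, by simp only [beq_iff_eq]; exact hr0⟩)
    obtain ⟨w, ws, hcons⟩ := List.exists_cons_of_ne_nil hFne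
    congr 1
    rw [hcons]
    simp only [List.map_cons, pvZipN]
    have hmin : ((ws.map String.toList).map List.length).foldl min w.toList.length
        = L.toNat := by
      rw [hFlen w (by simp [hcons])]
      apply pv_foldl_min_const
      intro y hy
      simp only [List.map_map, List.mem_map] at hy
      obtain ⟨s, hs, rfl⟩ := hy
      exact hFlen s (by simp [hcons, hs])
    rw [hmin]
    rw [PySem.List.pyRange_one 0 L]
    simp only [Int.sub_zero, List.map_map]
    apply List.map_congr_left
    intro i hi
    simp only [Function.comp_def, zero_add, PySem.List.pyGetD_natCast]
    rw [pv_mode_eq_max?, ← pv_counter_mode]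

-- ===== VERDICT (by name: the statement is the Claim_ definition above) =====
theorem post_process_multiple_plate_readings_py_spec : Claim_equal_post_process_multiple_plate_readings_py := by
  intro plate_readings _ _
  unfold Spec_post_process_multiple_plate_readings_py
  exact pv_main plate_readings
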